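-- pv_equiv track=rewrite | github.com/AnnasMazhar/PyPerfOptimizer | examples/simple_profiling.py | complex_algorithm
-- ===== SOURCE A (Python) =====
-- def complex_algorithm(input_data, multiplier=2):
--     """A more complex algorithm with various operations."""
--     # Initialize results
--     results = []
--
--     # Process each element
--     for i, item in enumerate(input_data):
--         # Do some calculations
--         value = item * multiplier
--
--         # Conditional processing
--         if value % 2 == 0:
--             # Even values get squared
--             value = value ** 2
--         else:
--             # Odd values get cubed
--             value = value ** 3
--
--         # Accumulate results
--         results.append(value)
--
--     # Generate some additional data
--     additional_data = [sum(results[:i+1]) for i in range(len(results))]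
--
--     # Combine the results
--     final_result = list(zip(results, additional_data))
--
--     return final_result
-- ===== SOURCE B (Python) =====
-- def complex_algorithm(input_data, multiplier=2):
--     """One pass: maintain a running sum instead of re-summing prefix slices."""
--     out = []
--     running = 0
--     for item in input_data:
--         v = item * multiplier
--         v = v * v if v % 2 == 0 else v * v * v
--         running += v
--         out.append((v, running))
--     return out
-- ===== Notes on version B (the rewrite author's own statement) =====
-- stated objective: faster
-- what changed: Single pass that keeps a running sum and emits each (value, prefix-sum) pair directly, instead of building the values list and then re-summing a prefix slice for every index.
import Mathlib
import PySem

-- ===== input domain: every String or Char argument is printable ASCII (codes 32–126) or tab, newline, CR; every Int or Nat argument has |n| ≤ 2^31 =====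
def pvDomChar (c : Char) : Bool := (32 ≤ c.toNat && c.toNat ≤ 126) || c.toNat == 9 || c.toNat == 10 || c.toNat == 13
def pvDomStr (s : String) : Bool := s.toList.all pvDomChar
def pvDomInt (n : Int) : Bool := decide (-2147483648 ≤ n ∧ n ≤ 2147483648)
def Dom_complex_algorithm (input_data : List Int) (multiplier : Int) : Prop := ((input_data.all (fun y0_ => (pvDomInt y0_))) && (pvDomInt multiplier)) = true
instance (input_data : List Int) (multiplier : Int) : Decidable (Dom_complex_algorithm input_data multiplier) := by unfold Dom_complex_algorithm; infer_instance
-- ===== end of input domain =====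

-- B replaces A's per-index prefix-slice re-summation by one pass with a running sum (objective: faster, O(n) vs O(n^2)).

-- ===== PORT A =====
-- value for one item: v = item*multiplier; squared if even, cubed if odd
def pvVal (multiplier item : Int) : Int :=
  let value := item * multiplier
  if PySem.Int.mod value 2 == 0 then value ^ 2 else value ^ 3

def complex_algorithm (input_data : List Int) (multiplier : Int) : List (Int × Int) :=
  let results := input_data.map (fun item => pvVal multiplier item)
  let additional_data :=
    (PySem.List.pyRange 0 (results.length : Int) 1).map
      (fun i => (PySem.List.slice results none (some (i + 1))).sum)
  List.zip results additional_data

-- ===== PORT B =====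
-- loop of Source B: running sum accumulator, emit (v, running) per element
def pvAltGo (multiplier running : Int) : List Int → List (Int × Int)
  | [] => []
  | item :: rest =>
      let v := item * multiplier
      let v2 := if PySem.Int.mod v 2 == 0 then v * v else v * v * v
      (v2, running + v2) :: pvAltGo multiplier (running + v2) rest

def complex_algorithm_alt (input_data : List Int) (multiplier : Int) : List (Int × Int) :=
  pvAltGo multiplier 0 input_data

-- ===== PRECONDITION & SPEC =====
def Spec_complex_algorithm (input_data : List Int) (multiplier : Int) (out : List (Int × Int)) : Prop := out = complex_algorithm_alt input_data multiplier
instance (input_data : List Int) (multiplier : Int) (out : List (Int × Int)) : Decidable (Spec_complex_algorithm input_data multiplier out) := by unfold Spec_complex_algorithm; infer_instance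

-- ===== CLAIM (what is proved, stated in full; the proofs are below) =====
def Claim_equal_complex_algorithm : Prop := ∀ (input_data : List Int) (multiplier : Int), Dom_complex_algorithm input_data multiplier → Spec_complex_algorithm input_data multiplier (complex_algorithm input_data multiplier)

-- ===== LEMMAS AND PROOFS =====

-- B's loop, expressed over the list of already-transformed values
def pvZipGo (running : Int) : List Int → List (Int × Int)
  | [] => []
  | v :: rest => (v, running + v) :: pvZipGo (running + v) rest

lemma pvAltGo_eq_zipGo (multiplier running : Int) (xs : List Int) :
    pvAltGo multiplier running xs = pvZipGo running (xs.map (fun item => pvVal multiplier item)) := by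
  induction xs generalizing running with
  | nil => rfl
  | cons x rest ih =>
      simp only [pvAltGo, pvZipGo, List.map_cons, ih, pvVal]
      split <;> ring_nf

lemma pvZipGo_eq_zip (r : List Int) (s : Int) :
    pvZipGo s r = List.zip r ((List.range r.length).map (fun k => s + (r.take (k + 1)).sum)) := by
  induction r generalizing s with
  | nil => rfl
  | cons v t ih =>
      simp only [pvZipGo, List.length_cons, List.range_succ_eq_map, List.map_cons,
        List.map_map, List.zip_cons_cons, List.take_succ_cons, List.sum_cons, List.take_zero,
        List.sum_nil, add_zero, ih]
      congr 2
      apply List.map_congr_left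
      intro k _
      simp [Function.comp]
      ring

theorem complex_algorithm_spec : Claim_equal_complex_algorithm := by
  intro input_data multiplier _
  unfold Spec_complex_algorithm complex_algorithm complex_algorithm_alt
  rw [pvAltGo_eq_zipGo, pvZipGo_eq_zip]
  set r := input_data.map (fun item => pvVal multiplier item) with hr
  simp only [PySem.List.pyRange_one, sub_zero, Int.toNat_natCast, List.map_map]
  congr 1
  apply List.map_congr_left
  intro k _
  have : (0 : Int) + (k : Int) + 1 = ((k + 1 : Nat) : Int) := by push_cast; ring
  simp only [Function.comp, this, PySem.List.slice_to_natCast]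
  ring
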